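-- pv_equiv track=rewrite | github.com/joashchn/cut-video | cut-video-web/backend/service/subtitle.py | _map_original_to_adjusted
-- ===== SOURCE A (Python) =====
-- from typing import List, Tuple
--
-- def _map_original_to_adjusted(
--
--     original_ms: int,
--     kept_segments: List[Tuple[int, int]],
-- ) -> int:
--     """
--     将原始视频的时间映射到剪辑后视频的相对时间
--
--     原理：对于时间点 T 在 segment i 中
--     adjusted = sum(segment_j.duration for j < i) + (T - segment_i.start)
--     """
--     cumulative_offset = 0
--
--     for i, (start_ms, end_ms) in enumerate(kept_segments):
--         if original_ms < start_ms:
--             # 在当前保留段之前（gap 中）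
--             return cumulative_offset
--         elif start_ms <= original_ms <= end_ms:
--             # 在当前保留段内
--             return cumulative_offset + (original_ms - start_ms)
--         else:
--             # 时间在当前保留段之后，累加这段的时长
--             cumulative_offset += (end_ms - start_ms)
--
--     # 超出所有保留段，返回总时长
--     return cumulative_offset
-- ===== SOURCE B (Python) =====
-- from typing import List, Tuple
--
-- def _map_original_to_adjusted(
--     original_ms: int,
--     kept_segments: List[Tuple[int, int]],
-- ) -> int:
--     # Locate-then-compute: first find the stopping index k (the first segment
--     # the scan would not pass over), then compute the answer in closed form
--     # from the prefix of kept durations before k.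
--     n = len(kept_segments)
--     k = next((i for i, (s, e) in enumerate(kept_segments)
--               if original_ms < s or original_ms <= e), n)
--     base = sum(e - s for s, e in kept_segments[:k])
--     if k < n:
--         s, e = kept_segments[k]
--         if s <= original_ms:
--             return base + (original_ms - s)
--     return base
-- ===== Notes on version B (the rewrite author's own statement) =====
-- stated objective: alternative
-- what changed: B replaces A's accumulate-while-scanning loop with a locate-then-compute decomposition: it first finds the stopping index k (first segment the scan would not pass over), then computes the answer in closed form as the sum of kept durations before k plus the in-segment offset.
import Mathlib
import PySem

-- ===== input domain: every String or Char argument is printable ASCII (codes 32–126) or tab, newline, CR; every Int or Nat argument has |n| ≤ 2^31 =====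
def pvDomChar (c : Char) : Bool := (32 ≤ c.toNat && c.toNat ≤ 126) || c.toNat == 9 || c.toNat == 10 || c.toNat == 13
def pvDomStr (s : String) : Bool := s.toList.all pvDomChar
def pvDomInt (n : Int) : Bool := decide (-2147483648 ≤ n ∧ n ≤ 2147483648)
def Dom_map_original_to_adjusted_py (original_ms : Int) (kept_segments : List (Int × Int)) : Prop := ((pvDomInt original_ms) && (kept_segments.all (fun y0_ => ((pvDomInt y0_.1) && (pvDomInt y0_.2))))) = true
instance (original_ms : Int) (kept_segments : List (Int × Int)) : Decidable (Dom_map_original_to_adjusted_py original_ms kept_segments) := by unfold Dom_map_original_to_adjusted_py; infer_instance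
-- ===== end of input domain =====

-- B replaces A's accumulate-while-scanning loop with a locate-then-compute decomposition (find the stopping index, then a closed-form sum over the prefix); same O(n) cost, alternative structure.
-- ===== PORT A =====
-- loop of A: scan segments with the cumulative offset accumulator
def pvLoopA (original_ms : Int) : List (Int × Int) → Int → Int
  | [], cum => cum
  | (s, e) :: rest, cum =>
    if original_ms < s then cum
    else if s ≤ original_ms ∧ original_ms ≤ e then cum + (original_ms - s)
    else pvLoopA original_ms rest (cum + (e - s))

def map_original_to_adjusted_py (original_ms : Int) (kept_segments : List (Int × Int)) : Int :=
  pvLoopA original_ms kept_segments 0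

-- ===== PORT B =====
def map_original_to_adjusted_py_alt (original_ms : Int) (kept_segments : List (Int × Int)) : Int :=
  let k := kept_segments.findIdx (fun p => decide (original_ms < p.1) || decide (original_ms ≤ p.2))
  let base := ((kept_segments.take k).map (fun p => p.2 - p.1)).sum
  match kept_segments[k]? with
  | some (s, _) => if s ≤ original_ms then base + (original_ms - s) else base
  | none => base

-- ===== PRECONDITION & SPEC =====
def Spec_map_original_to_adjusted_py (original_ms : Int) (kept_segments : List (Int × Int)) (out : Int) : Prop := out = map_original_to_adjusted_py_alt original_ms kept_segments
instance (original_ms : Int) (kept_segments : List (Int × Int)) (out : Int) : Decidable (Spec_map_original_to_adjusted_py original_ms kept_segments out) := by unfold Spec_map_original_to_adjusted_py; infer_instance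

-- ===== CLAIM (what is proved, stated in full; the proofs are below) =====
def Claim_equal_map_original_to_adjusted_py : Prop := ∀ (original_ms : Int) (kept_segments : List (Int × Int)), Dom_map_original_to_adjusted_py original_ms kept_segments → Spec_map_original_to_adjusted_py original_ms kept_segments (map_original_to_adjusted_py original_ms kept_segments)

-- ===== LEMMAS AND PROOFS =====

-- ===== VERDICT (by name: the statement is the Claim_ definition above) =====
lemma pvAlt_cons_stop (T s e : Int) (rest : List (Int × Int))
    (h : T < s ∨ T ≤ e) :
    map_original_to_adjusted_py_alt T ((s, e) :: rest)
      = if s ≤ T then T - s else 0 := by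
  have hp : (fun p : Int × Int => decide (T < p.1) || decide (T ≤ p.2)) (s, e) = true := by
    simp; omega
  simp [map_original_to_adjusted_py_alt, List.findIdx_cons, hp]

lemma pvAlt_cons_go (T s e : Int) (rest : List (Int × Int))
    (h : ¬ (T < s ∨ T ≤ e)) :
    map_original_to_adjusted_py_alt T ((s, e) :: rest)
      = (e - s) + map_original_to_adjusted_py_alt T rest := by
  have hp : (fun p : Int × Int => decide (T < p.1) || decide (T ≤ p.2)) (s, e) = false := by
    simp; omega
  simp only [map_original_to_adjusted_py_alt, List.findIdx_cons, hp, cond_false,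
    List.take_succ_cons, List.getElem?_cons_succ, List.map_cons, List.sum_cons]
  cases hk : rest[List.findIdx (fun p : Int × Int => decide (T < p.1) || decide (T ≤ p.2)) rest]? with
  | none => ring
  | some q => obtain ⟨s', e'⟩ := q; by_cases hs : s' ≤ T <;> simp [hs] <;> ring

lemma pvLoopA_eq_alt (T : Int) (segs : List (Int × Int)) (cum : Int) :
    pvLoopA T segs cum = cum + map_original_to_adjusted_py_alt T segs := by
  induction segs generalizing cum with
  | nil => simp [pvLoopA, map_original_to_adjusted_py_alt]
  | cons p rest ih =>
    obtain ⟨s, e⟩ := p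
    by_cases h1 : T < s
    · rw [pvAlt_cons_stop T s e rest (Or.inl h1)]
      simp [pvLoopA, h1]
    · by_cases h2 : T ≤ e
      · rw [pvAlt_cons_stop T s e rest (Or.inr h2)]
        have hs : s ≤ T := by omega
        simp [pvLoopA, h1, h2, hs]
      · rw [pvAlt_cons_go T s e rest (by omega)]
        simp only [pvLoopA, if_neg h1, if_neg (by omega : ¬ (s ≤ T ∧ T ≤ e))]
        rw [ih]; ring

theorem map_original_to_adjusted_py_spec : Claim_equal_map_original_to_adjusted_py := by
  intro T segs _
  unfold Spec_map_original_to_adjusted_py map_original_to_adjusted_py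
  rw [pvLoopA_eq_alt]; omega
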